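-- pv_equiv track=rewrite | github.com/alexzquach/HackTheNorth2019 | parsing.py | count_coords
-- ===== SOURCE A (Python) =====
-- def count_coords(st):
--     """ Returns the number of occuring coordinate. """
--     count = 0
--     i = 0
--     while i < len(st) - 1:
--         if st[i].lower() in 'abcdefgh' and st[i + 1] in '12345678':
--             count += 1
--             i += 2
--         else:
--             i += 1
--     return count
-- ===== SOURCE B (Python) =====
-- import re
--
-- _COORD = re.compile(r'[a-hA-H][1-8]')
--
-- def count_coords(st):
--     """ Returns the number of occuring coordinate. """
--     return len(_COORD.findall(st))
-- ===== Notes on version B (the rewrite author's own statement) =====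
-- stated objective: idiomatic
-- what changed: Replaces the manual index loop with a precompiled regex: count the non-overlapping matches of [a-hA-H][1-8] via re.findall, which reproduces the greedy skip-2-on-match / skip-1-on-miss scan.
import Mathlib
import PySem

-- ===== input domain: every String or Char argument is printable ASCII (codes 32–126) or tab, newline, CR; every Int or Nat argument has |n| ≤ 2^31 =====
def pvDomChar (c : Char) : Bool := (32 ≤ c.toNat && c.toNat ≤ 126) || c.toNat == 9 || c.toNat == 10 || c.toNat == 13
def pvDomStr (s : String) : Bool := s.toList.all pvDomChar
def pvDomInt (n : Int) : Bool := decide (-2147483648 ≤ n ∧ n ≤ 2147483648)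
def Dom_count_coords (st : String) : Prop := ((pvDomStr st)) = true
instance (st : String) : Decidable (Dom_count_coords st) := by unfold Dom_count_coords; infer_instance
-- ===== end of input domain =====

-- B replaces A's manual index loop by counting the non-overlapping regex matches of [a-hA-H][1-8] (idiomatic; same O(n) cost).

-- ===== PORT A =====
-- A's while loop: index i, counter count; the single-char `x in 'abcdefgh'` membership test
-- is ported as list membership of the char (exact: a 1-char substring of a string of distinct
-- chars occurs iff the char occurs), and `.lower()` as PySem.Chars.lowerChar (exact on ASCII).
def count_coords_go (cs : List Char) (count : Int) (i : Nat) : Int :=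
  if h : i + 1 < cs.length then
    if PySem.Chars.lowerChar cs[i] ∈ ['a','b','c','d','e','f','g','h'] ∧
       cs[i + 1] ∈ ['1','2','3','4','5','6','7','8'] then
      count_coords_go cs (count + 1) (i + 2)
    else
      count_coords_go cs count (i + 1)
  else count
termination_by cs.length - i

def count_coords (st : String) : Int := count_coords_go st.toList 0 0

-- ===== PORT B =====
-- B is `len(re.findall(r'[a-hA-H][1-8]', st))`; the regex engine's greedy non-overlapping
-- left-to-right scan is ported by hand (PySem has no regex): the character classes become
-- range checks, a match consumes two chars, a miss advances one char. Exact for this regex.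
def pvIsFile (c : Char) : Bool :=
  (decide ('a' ≤ c) && decide (c ≤ 'h')) || (decide ('A' ≤ c) && decide (c ≤ 'H'))

def pvIsRank (c : Char) : Bool := decide ('1' ≤ c) && decide (c ≤ '8')

def pvFindallCount : List Char → Int
  | a :: b :: rest =>
      if pvIsFile a && pvIsRank b then 1 + pvFindallCount rest
      else pvFindallCount (b :: rest)
  | _ => 0

def count_coords_alt (st : String) : Int := pvFindallCount st.toList

-- ===== PRECONDITION & SPEC =====
def Spec_count_coords (st : String) (out : Int) : Prop := out = count_coords_alt st
instance (st : String) (out : Int) : Decidable (Spec_count_coords st out) := by unfold Spec_count_coords; infer_instance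

-- ===== CLAIM (what is proved, stated in full; the proofs are below) =====
def Claim_equal_count_coords : Prop := ∀ (st : String), Dom_count_coords st → Spec_count_coords st (count_coords st)

-- ===== LEMMAS AND PROOFS =====

theorem pvChar_le_iff (a b : Char) : a ≤ b ↔ a.toNat ≤ b.toNat := by
  rw [Char.le_def, UInt32.le_iff_toNat_le]
  exact Iff.rfl

theorem pvChar_eq_iff (a b : Char) : a = b ↔ a.toNat = b.toNat := by
  constructor
  · intro h; rw [h]
  · intro h
    exact Char.ext (UInt32.toNat_inj.mp h)

theorem pvToNat_ofNat (n : Nat) (h : n.isValidChar) : (Char.ofNat n).toNat = n := by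
  simp [Char.ofNat, h, Char.ofNatAux, Char.toNat]

theorem pvMem_rank_iff (c : Char) :
    c ∈ ['1','2','3','4','5','6','7','8'] ↔ pvIsRank c = true := by
  simp only [List.mem_cons, List.not_mem_nil, or_false, pvIsRank, Bool.and_eq_true,
    decide_eq_true_eq, pvChar_eq_iff, pvChar_le_iff]
  have h1 : ('1' : Char).toNat = 49 := rfl
  have h8 : ('8' : Char).toNat = 56 := rfl
  rw [h1, h8]
  have : ('2' : Char).toNat = 50 := rfl; rw [this]
  have : ('3' : Char).toNat = 51 := rfl; rw [this]
  have : ('4' : Char).toNat = 52 := rfl; rw [this]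
  have : ('5' : Char).toNat = 53 := rfl; rw [this]
  have : ('6' : Char).toNat = 54 := rfl; rw [this]
  have : ('7' : Char).toNat = 55 := rfl; rw [this]
  omega

theorem pvMem_file_iff (c : Char) :
    c ∈ ['a','b','c','d','e','f','g','h'] ↔ 97 ≤ c.toNat ∧ c.toNat ≤ 104 := by
  simp only [List.mem_cons, List.not_mem_nil, or_false, pvChar_eq_iff]
  have : ('a' : Char).toNat = 97 := rfl; rw [this]
  have : ('b' : Char).toNat = 98 := rfl; rw [this]
  have : ('c' : Char).toNat = 99 := rfl; rw [this]
  have : ('d' : Char).toNat = 100 := rfl; rw [this]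
  have : ('e' : Char).toNat = 101 := rfl; rw [this]
  have : ('f' : Char).toNat = 102 := rfl; rw [this]
  have : ('g' : Char).toNat = 103 := rfl; rw [this]
  have : ('h' : Char).toNat = 104 := rfl; rw [this]
  omega

theorem pvLower_file_iff (c : Char) :
    PySem.Chars.lowerChar c ∈ ['a','b','c','d','e','f','g','h'] ↔ pvIsFile c = true := by
  unfold PySem.Chars.lowerChar PySem.Chars.isupper
  rw [pvMem_file_iff]
  simp only [pvIsFile, Bool.or_eq_true, Bool.and_eq_true, decide_eq_true_eq, pvChar_le_iff]
  have hA : ('A' : Char).toNat = 65 := rfl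
  have hZ : ('Z' : Char).toNat = 90 := rfl
  have hH : ('H' : Char).toNat = 72 := rfl
  have ha : ('a' : Char).toNat = 97 := rfl
  have hh : ('h' : Char).toNat = 104 := rfl
  split_ifs with h
  · simp only [hA, hZ] at h
    rw [pvToNat_ofNat (c.toNat + 32) (Or.inl (by omega))]
    rw [ha, hh, hA, hH]
    omega
  · simp only [hA, hZ] at h
    rw [ha, hh, hA, hH]
    omega

theorem pvFindall_short (l : List Char) (h : l.length ≤ 1) : pvFindallCount l = 0 := by
  match l with
  | [] => rfl
  | [a] => rfl
  | a :: b :: r => simp at h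

theorem pvGo_eq (k : Nat) : ∀ (cs : List Char) (i : Nat) (count : Int),
    cs.length - i ≤ k →
    count_coords_go cs count i = count + pvFindallCount (cs.drop i) := by
  induction k with
  | zero =>
    intro cs i count hk
    rw [count_coords_go]
    have hge : cs.length ≤ i := by omega
    rw [dif_neg (by omega)]
    rw [List.drop_eq_nil_of_le hge]
    simp [pvFindallCount]
  | succ k ih =>
    intro cs i count hk
    rw [count_coords_go]
    by_cases h : i + 1 < cs.length
    · rw [dif_pos h]
      have h0 : i < cs.length := by omega
      have hdrop : cs.drop i = cs[i] :: cs[i + 1] :: cs.drop (i + 2) := by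
        rw [List.drop_eq_getElem_cons h0, List.drop_eq_getElem_cons h]
      rw [hdrop]
      by_cases hc : PySem.Chars.lowerChar cs[i] ∈ ['a','b','c','d','e','f','g','h'] ∧
          cs[i + 1] ∈ ['1','2','3','4','5','6','7','8']
      · rw [if_pos hc]
        have hb : (pvIsFile cs[i] && pvIsRank cs[i + 1]) = true := by
          rw [Bool.and_eq_true]
          exact ⟨(pvLower_file_iff _).mp hc.1, (pvMem_rank_iff _).mp hc.2⟩
        rw [ih cs (i + 2) (count + 1) (by omega)]
        simp only [pvFindallCount, hb, if_true]
        ring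
      · rw [if_neg hc]
        have hb : (pvIsFile cs[i] && pvIsRank cs[i + 1]) = false := by
          rw [Bool.eq_false_iff]
          intro hcontra
          rw [Bool.and_eq_true] at hcontra
          exact hc ⟨(pvLower_file_iff _).mpr hcontra.1, (pvMem_rank_iff _).mpr hcontra.2⟩
        rw [ih cs (i + 1) count (by omega)]
        rw [List.drop_eq_getElem_cons h]
        simp only [pvFindallCount, hb, Bool.false_eq_true, if_false]
    · rw [dif_neg h]
      have : pvFindallCount (cs.drop i) = 0 := by
        apply pvFindall_short
        rw [List.length_drop]
        omega
      rw [this, add_zero]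

-- ===== VERDICT (by name: the statement is the Claim_ definition above) =====
theorem count_coords_spec : Claim_equal_count_coords := by
  intro st _
  unfold Spec_count_coords count_coords count_coords_alt
  rw [pvGo_eq st.toList.length st.toList 0 0 (by omega)]
  simp
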